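-- pv_equiv track=rewrite | github.com/czh869452912/ccode-win7 | scripts/validate-gui-smoke.py | _has_tool_result_after_last_user
-- ===== SOURCE A (Python) =====
-- def _has_tool_result_after_last_user(messages):
--     saw_user = False
--     for item in reversed(messages):
--         if item.get("role") == "tool":
--             saw_user = True
--         elif item.get("role") == "user":
--             return saw_user
--     return False
-- ===== SOURCE B (Python) =====
-- def _has_tool_result_after_last_user(messages):
--     last_user = -1
--     for i, item in enumerate(messages):
--         if item.get("role") == "user":
--             last_user = i
--     if last_user == -1:
--         return False
--     return any(item.get("role") == "tool" for item in messages[last_user + 1:])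
-- ===== Notes on version B (the rewrite author's own statement) =====
-- stated objective: alternative
-- what changed: Replaces the single reverse scan with early return by a forward pass that records the last user index followed by an any() scan of the suffix after it.
import Mathlib
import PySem

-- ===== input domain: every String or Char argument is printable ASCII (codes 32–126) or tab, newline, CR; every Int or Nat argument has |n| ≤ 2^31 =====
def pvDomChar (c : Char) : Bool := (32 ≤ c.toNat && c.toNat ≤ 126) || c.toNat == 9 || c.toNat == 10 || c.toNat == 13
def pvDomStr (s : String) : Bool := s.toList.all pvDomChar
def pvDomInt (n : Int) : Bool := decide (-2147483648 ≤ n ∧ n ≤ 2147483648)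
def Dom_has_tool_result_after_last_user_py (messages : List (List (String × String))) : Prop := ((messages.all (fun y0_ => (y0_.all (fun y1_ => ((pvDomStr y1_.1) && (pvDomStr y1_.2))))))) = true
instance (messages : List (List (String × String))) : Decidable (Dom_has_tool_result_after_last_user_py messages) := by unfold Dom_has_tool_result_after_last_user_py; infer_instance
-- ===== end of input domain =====

-- B differs from A by decomposition only: a forward last-user-index pass plus a suffix any() scan instead of A's reverse scan with early return.

-- item.get("role"): first-match lookup in the association list (Python dict keys are unique)
def pvRole (item : List (String × String)) : Option String :=
  (item.find? (fun p => p.1 == "role")).map (·.2)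

-- ===== PORT A =====
-- the reversed() for-loop of A: threads saw_user; returns at the first "user"
def pvGoA : List (List (String × String)) → Bool → Bool
  | [], _ => false
  | item :: rest, saw =>
    if pvRole item == some "tool" then pvGoA rest true
    else if pvRole item == some "user" then saw
    else pvGoA rest saw

def has_tool_result_after_last_user_py (messages : List (List (String × String))) : Bool :=
  pvGoA messages.reverse false

-- ===== PORT B =====
-- the enumerate loop of B: carries the running index i and the last_user accumulator
def pvLuGo : List (List (String × String)) → Int → Int → Int
  | [], _, acc => acc
  | item :: rest, i, acc =>
    pvLuGo rest (i + 1) (if pvRole item == some "user" then i else acc)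

def has_tool_result_after_last_user_py_alt (messages : List (List (String × String))) : Bool :=
  let last_user := pvLuGo messages 0 (-1)
  if last_user == -1 then false
  else (PySem.List.slice messages (some (last_user + 1)) none).any
    (fun item => pvRole item == some "tool")

-- ===== PRECONDITION & SPEC =====
def Spec_has_tool_result_after_last_user_py (messages : List (List (String × String))) (out : Bool) : Prop := out = has_tool_result_after_last_user_py_alt messages
instance (messages : List (List (String × String))) (out : Bool) : Decidable (Spec_has_tool_result_after_last_user_py messages out) := by unfold Spec_has_tool_result_after_last_user_py; infer_instance

-- ===== CLAIM (what is proved, stated in full; the proofs are below) =====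
def Claim_equal_has_tool_result_after_last_user_py : Prop := ∀ (messages : List (List (String × String))), Dom_has_tool_result_after_last_user_py messages → Spec_has_tool_result_after_last_user_py messages (has_tool_result_after_last_user_py messages)

-- ===== LEMMAS AND PROOFS =====

def pvIsU (item : List (String × String)) : Bool := pvRole item == some "user"
def pvIsT (item : List (String × String)) : Bool := pvRole item == some "tool"

-- index of the last user, as A/B both implicitly compute it
def pvLastU : List (List (String × String)) → Int
  | [] => -1
  | x :: rest => if rest.any pvIsU then 1 + pvLastU rest else if pvIsU x then 0 else -1

theorem pvLastU_nonneg (l : List (List (String × String))) (h : l.any pvIsU = true) :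
    0 ≤ pvLastU l := by
  induction l with
  | nil => simp at h
  | cons x rest ih =>
    simp only [pvLastU]
    by_cases hr : rest.any pvIsU = true
    · rw [if_pos hr]; have := ih hr; omega
    · have hrb : rest.any pvIsU = false := by simpa using hr
      rw [if_neg hr]
      simp only [List.any_cons, hrb, Bool.or_false] at h
      rw [if_pos h]

theorem pvLuGo_eq (l : List (List (String × String))) :
    ∀ (i acc : Int), pvLuGo l i acc = if l.any pvIsU then i + pvLastU l else acc := by
  induction l with
  | nil => intro i acc; simp [pvLuGo]
  | cons x rest ih =>
    intro i acc
    simp only [pvLuGo, ih, pvLastU, List.any_cons]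
    by_cases hr : rest.any pvIsU = true
    · simp only [hr, if_true, Bool.or_true]; omega
    · have hrb : rest.any pvIsU = false := by simpa using hr
      by_cases hx : (pvRole x == some "user") = true
      · have hxu : pvIsU x = true := hx
        simp only [hrb, hx, hxu, if_true, if_false, Bool.true_or, Bool.false_eq_true]
        omega
      · have hxf : (pvRole x == some "user") = false := Bool.eq_false_iff.mpr hx
        have hxu : pvIsU x = false := hxf
        simp [hrb, hxf, hxu]

theorem pvGoA_append (l m : List (List (String × String))) :
    ∀ saw, pvGoA (l ++ m) saw =
      if l.any pvIsU then pvGoA l saw else pvGoA m (saw || l.any pvIsT) := by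
  induction l with
  | nil => intro saw; simp [pvGoA]
  | cons x rest ih =>
    intro saw
    simp only [List.cons_append, pvGoA, List.any_cons]
    by_cases ht : (pvRole x == some "tool") = true
    · have hu : (pvRole x == some "user") = false := by
        simp at ht ⊢; simp [ht]
      have htT : pvIsT x = true := ht
      have huU : pvIsU x = false := hu
      simp [ht, ih, htT, huU, Bool.or_comm, Bool.or_assoc, Bool.or_left_comm]
    · have htb : (pvRole x == some "tool") = false := Bool.eq_false_iff.mpr ht
      have htT : pvIsT x = false := htb
      by_cases hx : (pvRole x == some "user") = true
      · have hxU : pvIsU x = true := hx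
        simp [htb, hx, hxU, pvGoA]
      · have hxb : (pvRole x == some "user") = false := Bool.eq_false_iff.mpr hx
        have hxU : pvIsU x = false := hxb
        simp [htb, hxb, hxU, htT, ih]

-- A's recurrence in forward order
theorem portA_cons (x : List (String × String)) (rest : List (List (String × String))) :
    has_tool_result_after_last_user_py (x :: rest) =
      if rest.any pvIsU then has_tool_result_after_last_user_py rest
      else (pvIsU x && rest.any pvIsT) := by
  simp only [has_tool_result_after_last_user_py, List.reverse_cons]
  rw [pvGoA_append]
  simp only [List.any_reverse]
  by_cases hr : rest.any pvIsU = true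
  · simp [hr]
  · have hrb : rest.reverse.any pvIsU = false := by simpa using hr
    rw [if_neg (by simpa using hr), if_neg hr]
    by_cases ht : (pvRole x == some "tool") = true
    · have hu : pvIsU x = false := by
        simp at ht; simp [pvIsU, ht]
      simp [pvGoA, ht, hu]
    · have htb : (pvRole x == some "tool") = false := Bool.eq_false_iff.mpr ht
      by_cases hx : (pvRole x == some "user") = true
      · have hxU : pvIsU x = true := hx
        simp [pvGoA, htb, hx, hxU]
      · have hxb : (pvRole x == some "user") = false := Bool.eq_false_iff.mpr hx
        have hxU : pvIsU x = false := hxb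
        simp [pvGoA, htb, hxb, hxU]

-- B's recurrence in forward order
theorem portB_cons (x : List (String × String)) (rest : List (List (String × String))) :
    has_tool_result_after_last_user_py_alt (x :: rest) =
      if rest.any pvIsU then has_tool_result_after_last_user_py_alt rest
      else (pvIsU x && rest.any pvIsT) := by
  simp only [has_tool_result_after_last_user_py_alt, pvLuGo_eq]
  by_cases hr : rest.any pvIsU = true
  · have h0 : 0 ≤ pvLastU rest := pvLastU_nonneg rest hr
    have hca : (x :: rest).any pvIsU = true := by simp [List.any_cons, hr]
    have hlc : pvLastU (x :: rest) = 1 + pvLastU rest := by simp [pvLastU, hr]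
    rw [if_pos hr, if_pos hca, if_pos hr, hlc]
    have hne : ((0 + (1 + pvLastU rest) == (-1 : Int))) = false := by
      simp; omega
    have hne2 : ((0 + pvLastU rest == (-1 : Int))) = false := by
      simp; omega
    rw [hne, hne2]
    simp only [Bool.false_eq_true, if_false]
    rw [PySem.List.slice_from (x :: rest) (a := 0 + (1 + pvLastU rest) + 1) (by omega),
        PySem.List.slice_from rest (a := 0 + pvLastU rest + 1) (by omega)]
    have hnat : (0 + (1 + pvLastU rest) + 1).toNat = (0 + pvLastU rest + 1).toNat + 1 := by omega
    rw [hnat]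
    simp
  · have hrb : rest.any pvIsU = false := by simpa using hr
    rw [if_neg hr]
    by_cases hx : (pvRole x == some "user") = true
    · have hxU : pvIsU x = true := hx
      have hca : (x :: rest).any pvIsU = true := by simp [List.any_cons, hxU]
      have hlc : pvLastU (x :: rest) = 0 := by simp [pvLastU, hrb, hxU]
      rw [if_pos hca, hlc]
      have hne : (((0:Int) + 0 == (-1 : Int))) = false := by decide
      rw [hne]
      simp only [Bool.false_eq_true, if_false]
      rw [PySem.List.slice_from (x :: rest) (a := (0:Int) + 0 + 1) (by omega)]
      simp [hxU]
      rfl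
    · have hxU : pvIsU x = false := Bool.eq_false_iff.mpr hx
      have hca : (x :: rest).any pvIsU = false := by simp [List.any_cons, hxU, hrb]
      simp [hca, hxU]

theorem portA_eq_portB (messages : List (List (String × String))) :
    has_tool_result_after_last_user_py messages = has_tool_result_after_last_user_py_alt messages := by
  induction messages with
  | nil => rfl
  | cons x rest ih =>
    rw [portA_cons, portB_cons, ih]

-- ===== VERDICT (by name: the statement is the Claim_ definition above) =====
theorem has_tool_result_after_last_user_py_spec : Claim_equal_has_tool_result_after_last_user_py := by
  intro messages _
  unfold Spec_has_tool_result_after_last_user_py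
  exact portA_eq_portB messages
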